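-- pv_equiv track=rewrite | github.com/yaidiflor82242/AyP-4 | ejermemosolos.py | max_suma
-- ===== SOURCE A (Python) =====
-- def max_suma(n, valores, memo=None):
--     if memo is None: memo = {}
--     if n == 0: return valores[0]
--     if n == 1: return valores[0] + valores[1]
--     if n in memo: return memo[n]
--     # El máximo viene de llegar desde n-1 o desde n-2
--     desde_uno = max_suma(n-1, valores, memo) + valores[n]
--     desde_dos = max_suma(n-2, valores, memo) + valores[n]
--     memo[n] = max(desde_uno, desde_dos)
--     return memo[n]
-- ===== SOURCE B (Python) =====
-- def max_suma(n, valores, memo=None):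
--     if memo is None:
--         memo = {}
--     if n == 0:
--         return valores[0]
--     if n == 1:
--         return valores[0] + valores[1]
--     prev2, prev1 = valores[0], valores[0] + valores[1]
--     for i in range(2, n + 1):
--         prev2, prev1 = prev1, memo[i] if i in memo else max(prev1, prev2) + valores[i]
--     return prev1
-- ===== Notes on version B (the rewrite author's own statement) =====
-- stated objective: alternative
-- what changed: Replaces top-down memoized recursion (dict-backed, recursion depth n) with a bottom-up iterative DP keeping only the last two values while still honouring caller-supplied cache entries, using the fact that both recursive branches add valores[n] so only max(f(n-1), f(n-2)) matters.
-- outside the precondition, e.g. on max_suma(2, [1], {2: 100}): A returns 100, B raises IndexError; on max_suma(-1, [1, 2], None): A raises RecursionError, B returns 3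
import Mathlib
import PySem

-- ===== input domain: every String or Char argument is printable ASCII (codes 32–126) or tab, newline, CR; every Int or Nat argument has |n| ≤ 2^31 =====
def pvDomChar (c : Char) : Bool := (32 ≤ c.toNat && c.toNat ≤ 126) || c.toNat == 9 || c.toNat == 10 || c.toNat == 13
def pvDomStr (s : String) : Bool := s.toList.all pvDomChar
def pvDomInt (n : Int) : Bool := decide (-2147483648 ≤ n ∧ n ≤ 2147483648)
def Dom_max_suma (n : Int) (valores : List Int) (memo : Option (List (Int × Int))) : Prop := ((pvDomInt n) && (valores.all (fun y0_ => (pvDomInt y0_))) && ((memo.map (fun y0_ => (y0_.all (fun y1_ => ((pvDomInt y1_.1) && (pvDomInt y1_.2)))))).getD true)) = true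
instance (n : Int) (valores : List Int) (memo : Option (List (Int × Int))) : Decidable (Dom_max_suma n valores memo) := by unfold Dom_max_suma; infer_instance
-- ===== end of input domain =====

-- B replaces A's top-down memoized recursion with a bottom-up two-variable loop that still honours
-- caller-supplied cache entries (alternative decomposition, similar cost). Equivalence is about the
-- RETURN value only: A also mutates a caller-supplied memo dict in place, B never writes to it.

-- ===== PORT A =====
-- the recursive body of A, threading the memo dict as state (Python mutates it in place);
-- fuel = n.toNat makes the recursion structural: it never runs out when 0 ≤ n (for n < 0 Python
-- recurses without bound — those inputs are outside Pre_)
def maxSumaRec (vs : List Int) (fuel : Nat) (n : Int) (m : PySem.Dict Int Int) : Int × PySem.Dict Int Int :=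
  if n = 0 then (PySem.List.pyGetD vs 0 0, m)
  else if n = 1 then (PySem.List.pyGetD vs 0 0 + PySem.List.pyGetD vs 1 0, m)
  else
    match m.get? n with
    | some v => (v, m)
    | none =>
      match fuel with
      | 0 => (0, m)  -- unreachable when fuel = n.toNat and 0 ≤ n
      | fuel' + 1 =>
        let r1 := maxSumaRec vs fuel' (n - 1) m
        let desdeUno := r1.1 + PySem.List.pyGetD vs n 0
        let r2 := maxSumaRec vs fuel' (n - 2) r1.2
        let desdeDos := r2.1 + PySem.List.pyGetD vs n 0
        let v := max desdeUno desdeDos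
        (v, r2.2.insert n v)

def max_suma (n : Int) (valores : List Int) (memo : Option (List (Int × Int))) : Int :=
  (maxSumaRec valores n.toNat n (PySem.Dict.ofList (memo.getD []))).1

-- ===== PORT B =====
def max_suma_alt (n : Int) (valores : List Int) (memo : Option (List (Int × Int))) : Int :=
  let d := PySem.Dict.ofList (memo.getD [])
  if n = 0 then PySem.List.pyGetD valores 0 0
  else if n = 1 then PySem.List.pyGetD valores 0 0 + PySem.List.pyGetD valores 1 0
  else
    ((PySem.List.pyRange 2 (n + 1) 1).foldl
      (fun st i =>
        (st.2, match d.get? i with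
               | some v => v
               | none => max st.2 st.1 + PySem.List.pyGetD valores i 0))
      (PySem.List.pyGetD valores 0 0,
       PySem.List.pyGetD valores 0 0 + PySem.List.pyGetD valores 1 0)).2

-- ===== PRECONDITION & SPEC =====
-- Pre_ excludes negative n (A recurses without bound, RecursionError) and n ≥ len(valores)
-- (A raises IndexError, except when a pre-seeded memo short-circuits every valores access
-- while B's loop initialisation still indexes valores — an accident of the cache contents).
def Pre_max_suma (n : Int) (valores : List Int) (memo : Option (List (Int × Int))) : Prop :=
  0 ≤ n ∧ n < valores.length
instance (n : Int) (valores : List Int) (memo : Option (List (Int × Int))) : Decidable (Pre_max_suma n valores memo) := by unfold Pre_max_suma; infer_instance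

def pvWitness_max_suma : Int × List Int × (Option (List (Int × Int))) := (3, [1, -2, 3, 4], some [(2, 7)])

def Spec_max_suma (n : Int) (valores : List Int) (memo : Option (List (Int × Int))) (out : Int) : Prop := out = max_suma_alt n valores memo
instance (n : Int) (valores : List Int) (memo : Option (List (Int × Int))) (out : Int) : Decidable (Spec_max_suma n valores memo out) := by unfold Spec_max_suma; infer_instance

-- ===== CLAIM (what is proved, stated in full; the proofs are below) =====
def Claim_equal_max_suma : Prop := ∀ (n : Int) (valores : List Int) (memo : Option (List (Int × Int))), Dom_max_suma n valores memo → Pre_max_suma n valores memo → Spec_max_suma n valores memo (max_suma n valores memo)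

-- ===== LEMMAS AND PROOFS =====

-- the recurrence both programs compute, relative to the initial cache m0
def pvG (vs : List Int) (i : Nat) : Int := PySem.List.pyGetD vs (i : Int) 0

def pvF (vs : List Int) (m0 : PySem.Dict Int Int) : Nat → Int
  | 0 => pvG vs 0
  | 1 => pvG vs 0 + pvG vs 1
  | (k+2) =>
    match m0.get? ((k + 2 : Nat) : Int) with
    | some v => v
    | none => max (pvF vs m0 (k+1)) (pvF vs m0 k) + pvG vs (k+2)

-- A's memo invariant: it extends the initial cache and every entry with key ≥ 2 holds pvF's value
def pvInv (vs : List Int) (m0 m : PySem.Dict Int Int) : Prop :=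
  (∀ k v, m0.get? k = some v → m.get? k = some v) ∧
  (∀ k v, 2 ≤ k → m.get? k = some v → v = pvF vs m0 k.toNat)

lemma pvF_int (vs : List Int) (m0 : PySem.Dict Int Int) (n : Int) (h2 : 2 ≤ n) :
    pvF vs m0 n.toNat =
      match m0.get? n with
      | some v => v
      | none => max (pvF vs m0 (n - 1).toNat) (pvF vs m0 (n - 2).toNat) + PySem.List.pyGetD vs n 0 := by
  obtain ⟨k, hk⟩ : ∃ k : Nat, n.toNat = k + 2 := ⟨n.toNat - 2, by omega⟩
  have h1 : (n - 1).toNat = k + 1 := by omega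
  have h0 : (n - 2).toNat = k := by omega
  have hn : ((k + 2 : Nat) : Int) = n := by omega
  rw [hk, h1, h0, pvF, pvG, hn]

lemma maxSumaRec_eq (vs : List Int) (m0 : PySem.Dict Int Int) :
    ∀ (fuel : Nat) (n : Int) (m : PySem.Dict Int Int), n.toNat ≤ fuel → 0 ≤ n → pvInv vs m0 m →
      (maxSumaRec vs fuel n m).1 = pvF vs m0 n.toNat ∧ pvInv vs m0 (maxSumaRec vs fuel n m).2 := by
  intro fuel
  induction fuel with
  | zero =>
    intro n m hN h0 hg
    have hn : n = 0 := by omega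
    subst hn
    rw [maxSumaRec]
    simp [pvF, pvG, hg]
  | succ N ih =>
    intro n m hN h0 hg
    obtain ⟨hsub, hgood⟩ := hg
    by_cases hn0 : n = 0
    · subst hn0; rw [maxSumaRec]; simp [pvF, pvG]; exact ⟨hsub, hgood⟩
    by_cases hn1 : n = 1
    · subst hn1; rw [maxSumaRec]
      simpa [pvF, pvG] using ⟨hsub, hgood⟩
    have h2 : 2 ≤ n := by omega
    rw [maxSumaRec]
    simp only [hn0, hn1, if_false]
    cases hget : m.get? n with
    | some v =>
      exact ⟨hgood n v h2 hget, by simpa [hget] using ⟨hsub, hgood⟩⟩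
    | none =>
      simp only []
      have hm0 : m0.get? n = none := by
        cases hc : m0.get? n with
        | none => rfl
        | some w => rw [hsub n w hc] at hget; simp at hget
      obtain ⟨H1v, H1g⟩ := ih (n - 1) m (by omega) (by omega) ⟨hsub, hgood⟩
      obtain ⟨H2v, H2g⟩ := ih (n - 2) (maxSumaRec vs N (n - 1) m).2 (by omega) (by omega) H1g
      have hval :
          max ((maxSumaRec vs N (n - 1) m).1 + PySem.List.pyGetD vs n 0)
              ((maxSumaRec vs N (n - 2) (maxSumaRec vs N (n - 1) m).2).1 + PySem.List.pyGetD vs n 0)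
            = pvF vs m0 n.toNat := by
        rw [H1v, H2v, max_add_add_right, pvF_int vs m0 n h2, hm0]
      obtain ⟨H2sub, H2good⟩ := H2g
      refine ⟨hval, ?_, ?_⟩
      · intro k v hk
        rw [PySem.Dict.get?_insert]
        by_cases hkn : k = n
        · subst hkn; rw [hm0] at hk; simp at hk
        · rw [if_neg hkn]; exact H2sub k v hk
      · intro k v hk2 hget'
        rw [PySem.Dict.get?_insert] at hget'
        by_cases hkn : k = n
        · subst hkn
          simp only [if_true, Option.some.injEq] at hget'
          rw [← hget', hval]
        · rw [if_neg hkn] at hget'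
          exact H2good k v hk2 hget'

-- the bottom-up fold computes the recurrence
lemma foldl_eq_pvF (vs : List Int) (m0 : PySem.Dict Int Int) :
    ∀ (k : Nat),
      ((PySem.List.pyRange 2 (2 + (k : Int)) 1).foldl
        (fun st i =>
          (st.2, match m0.get? i with
                 | some v => v
                 | none => max st.2 st.1 + PySem.List.pyGetD vs i 0))
        (pvF vs m0 0, pvF vs m0 1)) = (pvF vs m0 k, pvF vs m0 (k + 1)) := by
  intro k
  induction k with
  | zero => simp
  | succ k ih =>
    have hstep : (2 : Int) + ((k + 1 : Nat) : Int) = (2 + (k : Int)) + 1 := by push_cast; ring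
    rw [hstep, PySem.List.pyRange_one_succ_right (by omega), List.foldl_append, ih]
    have hcast : (2 : Int) + (k : Int) = ((k + 2 : Nat) : Int) := by push_cast; ring
    simp only [List.foldl_cons, List.foldl_nil, hcast]
    show (pvF vs m0 (k + 1),
          match m0.get? ((k + 2 : Nat) : Int) with
          | some v => v
          | none => max (pvF vs m0 (k + 1)) (pvF vs m0 k) + pvG vs (k + 2)) = _
    rw [← pvF]

lemma alt_eq_pvF (vs : List Int) (n : Int) (memo : Option (List (Int × Int))) (h0 : 0 ≤ n) :
    max_suma_alt n vs memo = pvF vs (PySem.Dict.ofList (memo.getD [])) n.toNat := by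
  unfold max_suma_alt
  set m0 := PySem.Dict.ofList (memo.getD []) with hm0
  by_cases hn0 : n = 0
  · subst hn0; simp [pvF, pvG]
  by_cases hn1 : n = 1
  · subst hn1; simp [pvF, pvG]
  have h2 : 2 ≤ n := by omega
  simp only [hn0, hn1, if_false]
  obtain ⟨k, hk⟩ : ∃ k : Nat, n + 1 = 2 + (k : Int) := ⟨(n - 1).toNat, by omega⟩
  have hfold := foldl_eq_pvF vs m0 k
  rw [hk]
  have hF : pvF vs m0 0 = PySem.List.pyGetD vs 0 0 := by simp [pvF, pvG]
  have hF1 : pvF vs m0 1 = PySem.List.pyGetD vs 0 0 + PySem.List.pyGetD vs 1 0 := by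
    simp [pvF, pvG]
  rw [← hF1, ← hF, hfold]
  have : k + 1 = n.toNat := by omega
  rw [this]

-- ===== VERDICT (by name: the statement is the Claim_ definition above) =====
theorem max_suma_spec : Claim_equal_max_suma := by
  intro n valores memo _hdom hpre
  obtain ⟨h0, _hlen⟩ := hpre
  unfold Spec_max_suma max_suma
  have hinv : pvInv valores (PySem.Dict.ofList (memo.getD [])) (PySem.Dict.ofList (memo.getD [])) := by
    refine ⟨fun k v hk => hk, ?_⟩
    intro k v hk2 hget
    have hk : k.toNat ≥ 2 := by omega
    obtain ⟨j, hj⟩ : ∃ j : Nat, k.toNat = j + 2 := ⟨k.toNat - 2, by omega⟩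
    rw [hj, pvF]
    have : ((j + 2 : Nat) : Int) = k := by omega
    rw [this, hget]
  obtain ⟨hval, -⟩ := maxSumaRec_eq valores (PySem.Dict.ofList (memo.getD [])) n.toNat n
    (PySem.Dict.ofList (memo.getD [])) le_rfl h0 hinv
  rw [hval, alt_eq_pvF valores n memo h0]
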